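-- pv_equiv track=rewrite | github.com/Jan1337z/algorithm-design | src/ueb/d/aufg01_min_intpart_exh.py | min_intpart_exhaustive
-- ===== SOURCE A (Python) =====
-- from itertools import product
--
-- def compatible(L,M):
--     deadline = -1
--     for i in sorted(M):
--         s,f = L[i]
--         if s < deadline: return False
--         deadline = f
--     return True
--
-- def sol_min_intpart(L,r):
--     for R in r:
--         if not compatible(L, R): return False
--     return True
--
-- def m_min_intpart(L,r):
--     resources = 0
--     for R in r:
--         if(len(R)!=0): resources += 1
--     return resources
--
-- def min_intpart_exhaustive(L):
--     m = len(L)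
--     C = []
--     opt = m
--     # create product like 0000, 0011, ... (for m=4)
--     #
--     # Example for 1122
--     #
--     # interval           i_1  i_2  i_3  i_4
--     # target resource     1    1    2    2
--     # interval 1 -> resource 1
--     # interval 2 -> resource 1
--     # interval 3 -> resource 2
--     # interval 3 -> resource 2
--
--     for order in product(*[range(i) for i in range(1,m+1)]):
--         # create new list with m resources
--         candidate = [[] for _ in range(m)]
--         # c_i    index of intervals
--         # r_i    resource for interval
--         # put each interval in the target resource
--         for c_i, r_i in enumerate(order):
--             candidate[r_i].append(c_i)
--         C.append(candidate)
--
--         for y in C: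
--             if sol_min_intpart(L, y):
--                 value = m_min_intpart(L, y)
--                 if value < opt:
--                     opt = value
--     return opt
-- ===== SOURCE B (Python) =====
-- def min_intpart_exhaustive(L):
--     # Backtracking over resource assignments: interval i may only use resources 0..i.
--     # A resource r is free for interval (s, f) when its current deadline (initially -1,
--     # as in the reference implementation) is <= s; placing the interval sets it to f.
--     # Returns the minimum number of resources over all feasible assignments,
--     # or len(L) when no assignment is feasible.
--     m = len(L)
--
--     def go(rest, i, deadlines):
--         if not rest:
--             return len(deadlines)
--         (s, f) = rest[0]
--         vs = [go(rest[1:], i + 1, {**deadlines, r: f})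
--               for r in range(i + 1) if deadlines.get(r, -1) <= s]
--         vs = [v for v in vs if v is not None]
--         return min(vs) if vs else None
--
--     res = go(L, 0, {})
--     return m if res is None else res
-- ===== Notes on version B (the rewrite author's own statement) =====
-- stated objective: alternative
-- what changed: A enumerates every assignment tuple from product(range(1),...,range(m)), materialises all m resource lists per tuple, keeps every candidate in a growing list C and re-evaluates the whole of C (sorting each group) after each new candidate; B is a recursive backtracking search that assigns interval i to one of resources 0..i only when that resource's current deadline permits it, pruning infeasible prefixes and carrying just a dict of per-resource deadlines.
import Mathlib
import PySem

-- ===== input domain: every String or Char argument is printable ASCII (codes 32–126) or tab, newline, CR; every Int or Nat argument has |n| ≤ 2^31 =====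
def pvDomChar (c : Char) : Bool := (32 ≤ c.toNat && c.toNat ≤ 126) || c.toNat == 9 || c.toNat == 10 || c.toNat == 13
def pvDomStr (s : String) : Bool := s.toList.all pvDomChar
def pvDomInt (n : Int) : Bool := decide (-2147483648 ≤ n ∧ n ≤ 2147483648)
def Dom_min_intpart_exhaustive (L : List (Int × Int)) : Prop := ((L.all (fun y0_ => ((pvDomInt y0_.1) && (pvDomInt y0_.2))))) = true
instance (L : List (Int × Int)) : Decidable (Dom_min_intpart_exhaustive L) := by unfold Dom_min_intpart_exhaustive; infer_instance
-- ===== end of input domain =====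

-- B replaces A's enumeration of all m!/check-all-accumulated-candidates search by a
-- pruned backtracking over resource assignments; equivalence of the return values is proved.

-- ===== PORT A =====

-- compatible(L, M): loop over sorted(M) with an early return; recursion carries the deadline.
def compGo (L : List (Int × Int)) : Int → List Int → Bool
  | _, [] => true
  | dl, i :: t =>
      match PySem.List.pyGet? L i with
      | none => false            -- IndexError: unreachable, candidate indices come from enumerate(order)
      | some (s, f) => if s < dl then false else compGo L f t

def compatibleA (L : List (Int × Int)) (M : List Int) : Bool :=
  compGo L (-1) (PySem.List.sorted M (fun x => x))

-- sol_min_intpart(L, r): early-return ∀-loop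
def solA (L : List (Int × Int)) (r : List (List Int)) : Bool :=
  r.all (fun R => compatibleA L R)

-- m_min_intpart(L, r): count the nonempty resources
def mvalA (r : List (List Int)) : Int :=
  r.foldl (fun acc R => if R.length ≠ 0 then acc + 1 else acc) 0

-- itertools.product(*lists) in CPython's order (last coordinate varies fastest)
def prodA : List (List Int) → List (List Int)
  | [] => [[]]
  | xs :: rest => xs.flatMap (fun x => (prodA rest).map (x :: ·))

-- candidate[r].append(v); product(range(1),…,range(m)) labels satisfy 0 ≤ r < m, positional modify is exact there
def appendAt (c : List (List Int)) (r : Int) (v : Int) : List (List Int) :=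
  if 0 ≤ r then c.modify r.toNat (· ++ [v]) else c

def min_intpart_exhaustive (L : List (Int × Int)) : Int :=
  let m := L.length
  let orders := prodA ((List.range m).map (fun i : Nat => PySem.List.pyRange 0 ((i : Int) + 1) 1))
  (orders.foldl
    (fun (st : List (List (List Int)) × Int) order =>
      let candidate := (PySem.List.enumerate order).foldl
        (fun c p => appendAt c p.2 p.1) (List.replicate m [])
      let C := st.1 ++ [candidate]
      let opt := C.foldl
        (fun o y => if solA L y then (let v := mvalA y; if v < o then v else o) else o) st.2
      (C, opt))
    ([], (m : Int))).2

-- ===== PORT B =====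

def goB : List (Int × Int) → Int → PySem.Dict Int Int → Option Int
  | [], _, d => some (d.size : Int)
  | (s, f) :: tail, i, d =>
      let vs := ((PySem.List.pyRange 0 (i + 1) 1).filter
          (fun r => decide (d.getD r (-1) ≤ s))).map
        (fun r => goB tail (i + 1) (d.insert r f))
      PySem.List.min? (vs.filterMap id) (fun v => v)

def min_intpart_exhaustive_alt (L : List (Int × Int)) : Int :=
  match goB L 0 PySem.Dict.empty with
  | none => (L.length : Int)
  | some v => v

-- ===== PRECONDITION & SPEC =====
def Spec_min_intpart_exhaustive (L : List (Int × Int)) (out : Int) : Prop := out = min_intpart_exhaustive_alt L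
instance (L : List (Int × Int)) (out : Int) : Decidable (Spec_min_intpart_exhaustive L out) := by unfold Spec_min_intpart_exhaustive; infer_instance

-- ===== CLAIM (what is proved, stated in full; the proofs are below) =====
def Claim_equal_min_intpart_exhaustive : Prop := ∀ (L : List (Int × Int)), Dom_min_intpart_exhaustive L → Spec_min_intpart_exhaustive L (min_intpart_exhaustive L)

-- ===== LEMMAS AND PROOFS =====

-- ---- shared vocabulary ----

-- one step per interval: place interval p.1 on resource p.2 if free, else the whole assignment fails
def sim : List ((Int × Int) × Int) → PySem.Dict Int Int → Option Int
  | [], d => some (d.size : Int)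
  | ((s, f), r) :: t, d => if d.getD r (-1) ≤ s then sim t (d.insert r f) else none

def finalD (ps : List ((Int × Int) × Int)) (d : PySem.Dict Int Int) : PySem.Dict Int Int :=
  ps.foldl (fun d' p => d'.insert p.2 p.1.2) d

def grp (ps : List ((Int × Int) × Int)) (r : Int) : List (Int × Int) :=
  (ps.filter (fun p => p.2 == r)).map (·.1)

def chain : Int → List (Int × Int) → Bool
  | _, [] => true
  | dl, (s, f) :: t => decide (dl ≤ s) && chain f t

def omin : Option Int → Option Int → Option Int
  | none, y => y
  | x, none => x
  | some a, some b => some (min a b)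

def ominList (l : List (Option Int)) : Option Int := l.foldl omin none

def rangesFrom : Int → Nat → List (List Int)
  | _, 0 => []
  | i, n + 1 => PySem.List.pyRange 0 (i + 1) 1 :: rangesFrom (i + 1) n

-- ---- omin / ominList toolbox ----

lemma omin_none_right (x : Option Int) : omin x none = x := by cases x <;> rfl

lemma omin_assoc (x y z : Option Int) : omin (omin x y) z = omin x (omin y z) := by
  cases x <;> cases y <;> cases z <;> simp [omin, min_assoc]

lemma foldl_omin_from (l : List (Option Int)) : ∀ a, l.foldl omin a = omin a (ominList l) := by
  induction l with
  | nil => intro a; simp [ominList, omin_none_right]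
  | cons x t ih =>
      intro a
      simp only [ominList, List.foldl_cons] at *
      rw [ih (omin a x), ih (omin none x), ← omin_assoc]
      cases x <;> simp [omin]

lemma ominList_append (a b : List (Option Int)) :
    ominList (a ++ b) = omin (ominList a) (ominList b) := by
  show (a ++ b).foldl omin none = _
  rw [List.foldl_append]
  show b.foldl omin (ominList a) = _
  rw [foldl_omin_from b (ominList a)]

lemma ominList_flatMap {α : Type} (l : List α) (g : α → List (Option Int)) :
    ominList (l.flatMap g) = ominList (l.map (fun x => ominList (g x))) := by
  induction l with
  | nil => rfl
  | cons x t ih =>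
      simp only [List.flatMap_cons, List.map_cons]
      rw [ominList_append, ih]
      show _ = ((fun x => ominList (g x)) x :: t.map fun x => ominList (g x)).foldl omin none
      rw [List.foldl_cons, foldl_omin_from (t.map fun x => ominList (g x)) (omin none (ominList (g x)))]
      cases ominList (g x) <;> simp [omin]

lemma ominList_filter {α : Type} (l : List α) (p : α → Bool) (f : α → Option Int)
    (h : ∀ x ∈ l, p x = false → f x = none) :
    ominList (l.map f) = ominList ((l.filter p).map f) := by
  induction l with
  | nil => rfl
  | cons x t ih =>
      by_cases hp : p x = true
      · simp only [List.filter_cons, hp, if_pos, List.map_cons]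
        simp only [ominList, List.foldl_cons]
        rw [foldl_omin_from (t.map f), foldl_omin_from ((t.filter p).map f),
          ih (fun y hy => h y (List.mem_cons_of_mem _ hy))]
      · have hf : f x = none := h x (List.mem_cons_self) (by simpa using hp)
        simp only [List.filter_cons, hp, List.map_cons, hf]
        simp only [ominList, List.foldl_cons, omin]
        exact ih (fun y hy => h y (List.mem_cons_of_mem _ hy))

lemma ominList_mem (W : List (Option Int)) (v : Int) (h : ominList W = some v) : some v ∈ W := by
  induction W with
  | nil => simp [ominList] at h
  | cons x t ih =>
      simp only [ominList, List.foldl_cons] at h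
      rw [foldl_omin_from] at h
      cases hx : x with
      | none =>
          subst hx; simp only [omin] at h
          exact List.mem_cons_of_mem _ (ih h)
      | some a =>
          cases ht : ominList t with
          | none => rw [hx, ht] at h; simp [omin] at h; simp [h]
          | some b =>
              rw [hx, ht] at h; simp only [omin, Option.some.injEq] at h
              rcases le_total a b with hab | hab
              · have : v = a := by rw [← h]; omega
                subst this; exact List.mem_cons_self
              · have hvb : v = b := by rw [← h]; omega
                subst hvb
                exact List.mem_cons_of_mem _ (ih ht)

lemma foldl_min_min (l : List Int) : ∀ a b : Int, l.foldl min (min a b) = min a (l.foldl min b) := by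
  induction l with
  | nil => intro a b; rfl
  | cons c t ih =>
      intro a b
      simp only [List.foldl_cons, min_assoc]
      exact ih a (min b c)

lemma min?_id_eq_ominList (l : List (Option Int)) :
    PySem.List.min? (l.filterMap id) (fun v => v) = ominList l := by
  induction l with
  | nil => rfl
  | cons x t ih =>
      cases x with
      | none =>
          rw [show List.filterMap id (none :: t) = List.filterMap id t from rfl, ih]
          show _ = List.foldl omin (omin none none) t
          rfl
      | some a =>
          rw [show List.filterMap id (some a :: t) = a :: List.filterMap id t from rfl,
            PySem.List.min?_id_cons]
          show _ = List.foldl omin (omin none (some a)) t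
          have : omin none (some a) = some a := rfl
          rw [this]
          rw [foldl_omin_from t (some a)]
          cases ht : ominList t with
          | none =>
              have : t.filterMap id = [] := by
                have := PySem.List.min?_eq_none_iff (xs := t.filterMap id) (key := fun v => v)
                rw [← this, ih, ht]
              rw [this]
              rfl
          | some b =>
              rw [← ih] at ht
              cases hf : t.filterMap id with
              | nil => rw [hf] at ht; simp [PySem.List.min?] at ht
              | cons y ys =>
                  rw [hf, PySem.List.min?_id_cons] at ht
                  have hb : ys.foldl min y = b := by injection ht
                  show some ((y :: ys).foldl min a) = omin (some a) (some b)
                  simp only [List.foldl_cons, omin]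
                  rw [← hb, ← foldl_min_min]

-- ---- B side: goB enumerates the product ----

lemma ominList_none {α : Type} (l : List α) :
    ominList (l.map (fun _ => (none : Option Int))) = none := by
  induction l with
  | nil => rfl
  | cons x t ih => exact ih

lemma goB_eq (rest : List (Int × Int)) : ∀ (i : Int) (d : PySem.Dict Int Int),
    goB rest i d =
      ominList ((prodA (rangesFrom i rest.length)).map (fun τ => sim (rest.zip τ) d)) := by
  induction rest with
  | nil => intro i d; rfl
  | cons hd tail ih =>
      intro i d
      obtain ⟨s, f⟩ := hd
      have hL : goB ((s, f) :: tail) i d =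
          ominList (((PySem.List.pyRange 0 (i + 1) 1).filter
              (fun r => decide (d.getD r (-1) ≤ s))).map
            (fun r => goB tail (i + 1) (d.insert r f))) := by
        show PySem.List.min? _ _ = _
        rw [min?_id_eq_ominList]
      rw [hL]
      rw [show rangesFrom i ((s, f) :: tail).length =
        PySem.List.pyRange 0 (i + 1) 1 :: rangesFrom (i + 1) tail.length from rfl]
      rw [show prodA (PySem.List.pyRange 0 (i + 1) 1 :: rangesFrom (i + 1) tail.length) =
        (PySem.List.pyRange 0 (i + 1) 1).flatMap
          (fun r => (prodA (rangesFrom (i + 1) tail.length)).map (r :: ·)) from rfl]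
      rw [List.map_flatMap, ominList_flatMap]
      have hblock : ∀ r : Int,
          ((prodA (rangesFrom (i + 1) tail.length)).map (r :: ·)).map
              (fun τ => sim (((s, f) :: tail).zip τ) d) =
            (prodA (rangesFrom (i + 1) tail.length)).map
              (fun τ => sim (((s, f), r) :: tail.zip τ) d) := by
        intro r
        rw [List.map_map]
        rfl
      rw [show (fun r => ominList (List.map (fun τ => sim (((s, f) :: tail).zip τ) d)
            ((prodA (rangesFrom (i + 1) tail.length)).map (r :: ·)))) =
          (fun r => ominList ((prodA (rangesFrom (i + 1) tail.length)).map
            (fun τ => sim (((s, f), r) :: tail.zip τ) d))) from funext (fun r => by rw [hblock r])]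
      rw [ominList_filter (PySem.List.pyRange 0 (i + 1) 1)
        (fun r => decide (d.getD r (-1) ≤ s))
        (fun r => ominList ((prodA (rangesFrom (i + 1) tail.length)).map
          (fun τ => sim (((s, f), r) :: tail.zip τ) d)))
        (by
          intro r _ hr
          have hc : ¬ (d.getD r (-1) ≤ s) := by simpa using hr
          have : ∀ τ ∈ prodA (rangesFrom (i + 1) tail.length),
              sim (((s, f), r) :: tail.zip τ) d = (fun _ => (none : Option Int)) τ := by
            intro τ _
            simp [sim, hc]
          beta_reduce
          rw [List.map_congr_left this, ominList_none])]
      congr 1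
      apply List.map_congr_left
      intro r hr
      have hc : d.getD r (-1) ≤ s := by
        have := List.of_mem_filter hr
        simpa using this
      rw [ih (i + 1) (d.insert r f)]
      congr 1
      apply List.map_congr_left
      intro τ _
      simp [sim, hc]

-- ---- sim vs per-group chains ----

lemma sim_some (ps : List ((Int × Int) × Int)) : ∀ d,
    (∀ r : Int, chain (d.getD r (-1)) (grp ps r) = true) →
    sim ps d = some ((finalD ps d).size : Int) := by
  induction ps with
  | nil => intro d _; rfl
  | cons p t ih =>
      obtain ⟨⟨s, f⟩, r0⟩ := p
      intro d h
      have h0 := h r0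
      rw [show grp (((s, f), r0) :: t) r0 = (s, f) :: grp t r0 from by
        simp [grp]] at h0
      rw [show chain (d.getD r0 (-1)) ((s, f) :: grp t r0) =
        (decide (d.getD r0 (-1) ≤ s) && chain f (grp t r0)) from rfl] at h0
      simp only [Bool.and_eq_true, decide_eq_true_eq] at h0
      show (if d.getD r0 (-1) ≤ s then sim t (d.insert r0 f) else none) = _
      rw [if_pos h0.1]
      rw [ih (d.insert r0 f) ?_]
      · rfl
      · intro r
        by_cases hr : r = r0
        · subst hr
          rw [PySem.Dict.getD_insert_self]
          exact h0.2
        · rw [PySem.Dict.getD_insert, if_neg hr]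
          have hx := h r
          rw [show grp (((s, f), r0) :: t) r = grp t r from by
            simp [grp, Ne.symm hr]] at hx
          exact hx

lemma sim_none (ps : List ((Int × Int) × Int)) : ∀ d,
    ¬ (∀ r : Int, chain (d.getD r (-1)) (grp ps r) = true) →
    sim ps d = none := by
  induction ps with
  | nil =>
      intro d h
      exact absurd (fun r => rfl) h
  | cons p t ih =>
      obtain ⟨⟨s, f⟩, r0⟩ := p
      intro d h
      by_cases hc : d.getD r0 (-1) ≤ s
      · show (if d.getD r0 (-1) ≤ s then sim t (d.insert r0 f) else none) = none
        rw [if_pos hc]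
        apply ih (d.insert r0 f)
        intro hall
        apply h
        intro r
        by_cases hr : r = r0
        · rw [hr]
          rw [show grp (((s, f), r0) :: t) r0 = (s, f) :: grp t r0 from by
            simp [grp]]
          rw [show chain (d.getD r0 (-1)) ((s, f) :: grp t r0) =
            (decide (d.getD r0 (-1) ≤ s) && chain f (grp t r0)) from rfl]
          have := hall r0
          rw [PySem.Dict.getD_insert_self] at this
          simp [hc, this]
        · rw [show grp (((s, f), r0) :: t) r = grp t r from by
            simp [grp, Ne.symm hr]]
          have := hall r
          rw [PySem.Dict.getD_insert, if_neg hr] at this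
          exact this
      · show (if d.getD r0 (-1) ≤ s then sim t (d.insert r0 f) else none) = none
        rw [if_neg hc]

lemma sim_le (ps : List ((Int × Int) × Int)) : ∀ d v,
    sim ps d = some v → v ≤ (d.size : Int) + ps.length := by
  induction ps with
  | nil =>
      intro d v h
      simp only [sim, Option.some.injEq] at h
      simp [← h]
  | cons p t ih =>
      obtain ⟨⟨s, f⟩, r0⟩ := p
      intro d v h
      by_cases hc : d.getD r0 (-1) ≤ s
      · rw [show sim (((s, f), r0) :: t) d =
          (if d.getD r0 (-1) ≤ s then sim t (d.insert r0 f) else none) from rfl,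
          if_pos hc] at h
        have h1 := ih (d.insert r0 f) v h
        have h2 : ((d.insert r0 f).size : Int) ≤ (d.size : Int) + 1 := by
          rw [PySem.Dict.size_insert]
          split_ifs <;> simp
        have : (t.length : Int) + 1 = ((((s, f), r0) :: t).length : Int) := by
          simp
        omega
      · rw [show sim (((s, f), r0) :: t) d =
          (if d.getD r0 (-1) ≤ s then sim t (d.insert r0 f) else none) from rfl,
          if_neg hc] at h
        exact absurd h (by simp)

-- ---- A side: candidate building ----

def idxGrp (τ : List Int) (r : Int) : List Int :=
  ((PySem.List.enumerate τ).filter (fun p => p.2 == r)).map (·.1)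

lemma length_buildfold (e : List (Int × Int)) : ∀ (c : List (List Int)),
    (e.foldl (fun c p => appendAt c p.2 p.1) c).length = c.length := by
  induction e with
  | nil => intro c; rfl
  | cons p t ih =>
      intro c
      rw [List.foldl_cons, ih]
      simp only [appendAt]
      split_ifs <;> simp [List.length_modify]

lemma getD_buildfold (e : List (Int × Int)) : ∀ (c : List (List Int)) (j : Nat),
    j < c.length →
    (∀ p ∈ e, 0 ≤ p.2 ∧ p.2 < (c.length : Int)) →
    (e.foldl (fun c p => appendAt c p.2 p.1) c).getD j [] =
      c.getD j [] ++ (e.filter (fun p => p.2 == (j : Int))).map (·.1) := by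
  induction e with
  | nil => intro c j hj _; simp
  | cons p t ih =>
      intro c j hj hlab
      obtain ⟨hp0, hpm⟩ := hlab p List.mem_cons_self
      have hstep : appendAt c p.2 p.1 = c.modify p.2.toNat (· ++ [p.1]) := by
        simp [appendAt, hp0]
      have hlen : (c.modify p.2.toNat (· ++ [p.1])).length = c.length := List.length_modify ..
      have hlab' : ∀ q ∈ t, 0 ≤ q.2 ∧ q.2 < ((c.modify p.2.toNat (· ++ [p.1])).length : Int) := by
        intro q hq
        rw [hlen]
        exact hlab q (List.mem_cons_of_mem _ hq)
      rw [List.foldl_cons, hstep,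
        ih (c.modify p.2.toNat (· ++ [p.1])) j (by rw [hlen]; exact hj) hlab']
      have hmod : (c.modify p.2.toNat (· ++ [p.1])).getD j [] =
          if p.2.toNat = j then c.getD j [] ++ [p.1] else c.getD j [] := by
        rw [List.getD_eq_getElem _ _ (by rw [hlen]; exact hj), List.getD_eq_getElem _ _ hj,
          List.getElem_modify]
      rw [hmod]
      by_cases hcase : p.2.toNat = j
      · have hbeq : (p.2 == (j : Int)) = true := by
          have : p.2 = (j : Int) := by omega
          simp [this]
        rw [if_pos hcase, List.filter_cons, hbeq]
        simp [List.append_assoc]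
      · have hbeq : (p.2 == (j : Int)) = false := by
          have : p.2 ≠ (j : Int) := by omega
          simp [this]
        rw [if_neg hcase, List.filter_cons, hbeq]
        simp

lemma build_cand (τ : List Int) (m : Nat) (hlab : ∀ p ∈ PySem.List.enumerate τ, 0 ≤ p.2 ∧ p.2 < (m : Int)) :
    (PySem.List.enumerate τ).foldl (fun c p => appendAt c p.2 p.1) (List.replicate m []) =
      (List.range m).map (fun r : Nat => idxGrp τ (r : Int)) := by
  apply List.ext_getElem
  · rw [length_buildfold]; simp
  · intro j hj1 hj2
    have hjm : j < m := by
      have := hj1; rw [length_buildfold] at this; simpa using this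
    rw [← List.getD_eq_getElem _ [] hj1, ← List.getD_eq_getElem _ [] hj2]
    rw [getD_buildfold (PySem.List.enumerate τ) (List.replicate m []) j (by simpa using hjm)
      (by intro p hp; simpa using hlab p hp)]
    rw [List.getD_eq_getElem _ [] hj2]
    simp [idxGrp, hjm]

-- ---- A side: compatibleA on an index group is chain on the pair group ----

-- enumerate of τ is the label part of enumerate of (L.zip τ)
lemma enum_zip (L : List (Int × Int)) : ∀ (τ : List Int), τ.length = L.length → ∀ (st : Int),
    PySem.List.enumerate τ st =
      (PySem.List.enumerate (L.zip τ) st).map (fun q => (q.1, q.2.2)) := by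
  induction L with
  | nil =>
      intro τ hlen st
      have : τ = [] := List.eq_nil_of_length_eq_zero hlen
      subst this; rfl
  | cons a L' ih =>
      intro τ hlen st
      cases τ with
      | nil => simp at hlen
      | cons b τ' =>
          rw [List.zip_cons_cons, PySem.List.enumerate_cons, PySem.List.enumerate_cons,
            List.map_cons, ih τ' (by simpa using hlen) (st + 1)]

lemma compGo_chain (L : List (Int × Int)) :
    ∀ (F : List (Int × ((Int × Int) × Int))) (dl : Int),
    (∀ q ∈ F, PySem.List.pyGet? L q.1 = some q.2.1) →
    compGo L dl (F.map (·.1)) = chain dl (F.map (fun q => q.2.1)) := by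
  intro F
  induction F with
  | nil => intro dl _; rfl
  | cons q t ih =>
      intro dl hget
      obtain ⟨i, ⟨⟨sv, fv⟩, rv⟩⟩ := q
      have h1 : PySem.List.pyGet? L i = some (sv, fv) := hget _ List.mem_cons_self
      rw [List.map_cons, List.map_cons]
      show compGo L dl (i :: t.map (·.1)) = chain dl ((sv, fv) :: t.map (fun q => q.2.1))
      have hstep : compGo L dl (i :: t.map (·.1)) =
          if sv < dl then false else compGo L fv (t.map (·.1)) := by
        simp [compGo, h1]
      rw [hstep, show chain dl ((sv, fv) :: t.map (fun q => q.2.1)) =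
        (decide (dl ≤ sv) && chain fv (t.map (fun q => q.2.1))) from rfl]
      by_cases hlt : sv < dl
      · simp [hlt, show ¬ (dl ≤ sv) by omega]
      · rw [if_neg hlt]
        simp only [show (decide (dl ≤ sv)) = true by simp; omega, Bool.true_and]
        exact ih fv (fun q hq => hget q (List.mem_cons_of_mem _ hq))

lemma compat_chain (L : List (Int × Int)) (τ : List Int) (hlen : τ.length = L.length) (r : Int) :
    compatibleA L (idxGrp τ r) = chain (-1) (grp (L.zip τ) r) := by
  have hE : idxGrp τ r =
      ((PySem.List.enumerate (L.zip τ)).filter (fun q => q.2.2 == r)).map (·.1) := by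
    rw [idxGrp, enum_zip L τ hlen 0, List.filter_map]
    rw [List.map_map]
    rfl
  have hG : grp (L.zip τ) r =
      ((PySem.List.enumerate (L.zip τ)).filter (fun q => q.2.2 == r)).map (fun q => q.2.1) := by
    rw [grp]
    conv_lhs => rw [← PySem.List.map_snd_enumerate (L.zip τ) 0]
    rw [List.filter_map, List.map_map]
    rfl
  have hsorted : PySem.List.sorted (idxGrp τ r) (fun x => x) = idxGrp τ r := by
    apply PySem.List.sorted_eq_self_of_pairwise
    have h1 : (PySem.List.enumerate τ).Pairwise (fun p q => p.1 < q.1) :=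
      PySem.List.pairwise_lt_enumerate τ 0
    have h2 := h1.filter (fun p => p.2 == r)
    have h3 : (idxGrp τ r).Pairwise (· < ·) := by
      rw [idxGrp]
      exact (List.pairwise_map).mpr h2
    exact h3.imp le_of_lt
  rw [compatibleA, hsorted, hE, hG]
  apply compGo_chain
  intro q hq
  have hqE := List.mem_of_mem_filter hq
  rw [PySem.List.mem_enumerate_iff] at hqE
  obtain ⟨k, hk, rfl⟩ := hqE
  have hkL : k < L.length := by
    rw [List.length_zip] at hk; omega
  have hz : (L.zip τ)[k] = (L[k], τ[k]) := List.getElem_zip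
  simp only [zero_add, hz]
  rw [show ((k : Int)) = ((k : Nat) : Int) from rfl, PySem.List.pyGet?_natCast]
  simp [hkL]

-- ---- A side: loop normal form ----

def stepA (L : List (Int × Int)) (o : Int) (y : List (List Int)) : Int :=
  if solA L y then (let v := mvalA y; if v < o then v else o) else o

lemma stepA_le (L : List (Int × Int)) (o : Int) (y : List (List Int)) : stepA L o y ≤ o := by
  simp only [stepA]
  split_ifs <;> omega

lemma foldl_stepA_le (L : List (Int × Int)) (X : List (List (List Int))) (a : Int) :
    X.foldl (stepA L) a ≤ a := by
  induction X generalizing a with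
  | nil => simp
  | cons x t ih => exact le_trans (ih (stepA L a x)) (stepA_le L a x)

lemma foldl_stepA_le_mval (L : List (Int × Int)) (X : List (List (List Int)))
    (y : List (List Int)) (hy : y ∈ X) (hs : solA L y = true) :
    ∀ a : Int, X.foldl (stepA L) a ≤ mvalA y := by
  induction X with
  | nil => cases hy
  | cons x t ih =>
      intro a
      rcases List.mem_cons.mp hy with hx | hx
      · subst hx
        refine le_trans (foldl_stepA_le L t (stepA L a y)) ?_
        simp only [stepA, hs, if_true]
        split_ifs <;> omega
      · exact ih hx (stepA L a x)

lemma foldl_stepA_noop (L : List (Int × Int)) (X : List (List (List Int))) (a : Int)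
    (h : ∀ y ∈ X, solA L y = true → a ≤ mvalA y) :
    X.foldl (stepA L) a = a := by
  induction X with
  | nil => rfl
  | cons x t ih =>
      have hx : stepA L a x = a := by
        simp only [stepA]
        split_ifs with h1 h2
        · exact absurd h2 (by have := h x List.mem_cons_self h1; omega)
        · rfl
        · rfl
      rw [List.foldl_cons, hx]
      exact ih (fun y hy => h y (List.mem_cons_of_mem _ hy))

def candOf (m : Nat) (τ : List Int) : List (List Int) :=
  (PySem.List.enumerate τ).foldl (fun c p => appendAt c p.2 p.1) (List.replicate m [])

lemma loopA_inv (L : List (Int × Int)) (os : List (List Int)) :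
    ∀ (C : List (List (List Int))) (opt : Int),
    opt = C.foldl (stepA L) (L.length : Int) →
    (os.foldl
      (fun (st : List (List (List Int)) × Int) order =>
        let candidate := candOf L.length order
        let C := st.1 ++ [candidate]
        let opt := C.foldl
          (fun o y => if solA L y then (let v := mvalA y; if v < o then v else o) else o) st.2
        (C, opt))
      (C, opt)) =
      (C ++ os.map (candOf L.length),
        (C ++ os.map (candOf L.length)).foldl (stepA L) (L.length : Int)) := by
  induction os with
  | nil =>
      intro C opt h
      simp [h]
  | cons o rest ih =>
      intro C opt h
      rw [List.foldl_cons]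
      show List.foldl _
        (C ++ [candOf L.length o], (C ++ [candOf L.length o]).foldl (stepA L) opt) rest = _
      have h1 : C.foldl (stepA L) opt = opt := by
        apply foldl_stepA_noop
        intro y hy hs
        rw [h]
        exact foldl_stepA_le_mval L C y hy hs (L.length : Int)
      have hopt : (C ++ [candOf L.length o]).foldl (stepA L) opt =
          (C ++ [candOf L.length o]).foldl (stepA L) (L.length : Int) := by
        rw [List.foldl_append, List.foldl_append, h1, h]
      rw [hopt, ih (C ++ [candOf L.length o]) _ rfl]
      simp

-- ---- product membership facts ----

lemma mem_prodA (ls : List (List Int)) (τ : List Int) (h : τ ∈ prodA ls) :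
    τ.length = ls.length ∧ ∀ k (hk : k < τ.length) (hk' : k < ls.length), τ[k] ∈ ls[k] := by
  induction ls generalizing τ with
  | nil =>
      simp only [prodA, List.mem_singleton] at h
      subst h
      exact ⟨rfl, fun k hk _ => absurd hk (by simp)⟩
  | cons xs rest ih =>
      simp only [prodA, List.mem_flatMap, List.mem_map] at h
      obtain ⟨x, hx, τ', hτ', rfl⟩ := h
      obtain ⟨hlen, hidx⟩ := ih τ' hτ'
      refine ⟨by simp [hlen], ?_⟩
      intro k hk hk'
      cases k with
      | zero => simpa using hx
      | succ j =>
          simp only [List.getElem_cons_succ]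
          exact hidx j (by simpa using hk) (by simpa using hk')

lemma rangesFrom_eq (m : Nat) : ∀ (i : Int),
    rangesFrom i m = (List.range m).map (fun k : Nat => PySem.List.pyRange 0 (i + (k : Int) + 1) 1) := by
  induction m with
  | zero => intro i; rfl
  | succ n ih =>
      intro i
      rw [show rangesFrom i (n + 1) =
        PySem.List.pyRange 0 (i + 1) 1 :: rangesFrom (i + 1) n from rfl, ih (i + 1)]
      rw [List.range_succ_eq_map, List.map_cons, List.map_map]
      congr 1
      · norm_num
      · apply List.map_congr_left
        intro k _
        simp only [Function.comp]
        congr 1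
        push_cast
        ring

-- ---- per-order value: A's candidate evaluation equals sim ----

lemma valA_eq_sim (L : List (Int × Int)) (τ : List Int) (hlen : τ.length = L.length)
    (hlab : ∀ p ∈ PySem.List.enumerate τ, 0 ≤ p.2 ∧ p.2 < (L.length : Int)) :
    (if solA L (candOf L.length τ) then some (mvalA (candOf L.length τ)) else none) =
      sim (L.zip τ) PySem.Dict.empty := by
  have hmem : ∀ x ∈ τ, 0 ≤ x ∧ x < (L.length : Int) := by
    intro x hx
    rw [← PySem.List.map_snd_enumerate τ 0] at hx
    obtain ⟨p, hp, rfl⟩ := List.mem_map.mp hx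
    exact hlab p hp
  have hcand : candOf L.length τ =
      (List.range L.length).map (fun r : Nat => idxGrp τ (r : Int)) := by
    rw [candOf]
    exact build_cand τ L.length hlab
  have hgrp_out : ∀ r : Int, (¬ (0 ≤ r ∧ r < (L.length : Int))) → grp (L.zip τ) r = [] := by
    intro r hr
    rw [grp, List.filter_eq_nil_iff.mpr, List.map_nil]
    intro p hp
    have := hmem p.2 (List.of_mem_zip hp).2
    simp only [beq_iff_eq]
    omega
  have hsol : solA L (candOf L.length τ) = true ↔
      (∀ r : Int, chain ((PySem.Dict.empty : PySem.Dict Int Int).getD r (-1))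
        (grp (L.zip τ) r) = true) := by
    rw [solA, hcand, List.all_eq_true]
    constructor
    · intro h r
      rw [PySem.Dict.getD_empty]
      by_cases hr : 0 ≤ r ∧ r < (L.length : Int)
      · have hrn : r = ((r.toNat : Nat) : Int) := by omega
        have h1 := h (idxGrp τ r) (List.mem_map.mpr ⟨r.toNat, by
          simp only [List.mem_range]
          constructor
          · omega
          · rw [← hrn]⟩)
        rw [← compat_chain L τ hlen r]
        simpa using h1
      · rw [hgrp_out r hr]; rfl
    · intro h R hR
      obtain ⟨rn, _, rfl⟩ := List.mem_map.mp hR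
      have := h (rn : Int)
      rw [PySem.Dict.getD_empty] at this
      simp only [compat_chain L τ hlen]
      simpa using this
  have hmval : mvalA (candOf L.length τ) =
      ((finalD (L.zip τ) PySem.Dict.empty).size : Int) := by
    rw [mvalA, hcand, PySem.List.foldl_ite_add_one (fun R : List Int => R.length ≠ 0)]
    rw [List.countP_map]
    have hpt : ((fun R : List Int => decide (R.length ≠ 0)) ∘ (fun r : Nat => idxGrp τ (r : Int))) =
        (fun j : Nat => decide ((j : Int) ∈ τ)) := by
      funext j
      simp only [Function.comp]
      congr 1
      rw [eq_iff_iff]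
      rw [idxGrp]
      constructor
      · intro h
        have h2 : ((PySem.List.enumerate τ).filter (fun p => p.2 == (j : Int))) ≠ [] := by
          intro hnil
          rw [hnil] at h
          simp at h
        obtain ⟨p, hp⟩ := List.exists_mem_of_ne_nil _ h2
        have hpe := List.mem_of_mem_filter hp
        have hpq : (p.2 == (j : Int)) = true := (List.mem_filter.mp hp).2
        have : p.2 ∈ τ := by
          rw [← PySem.List.map_snd_enumerate τ 0]
          exact List.mem_map_of_mem hpe
        rw [beq_iff_eq] at hpq
        rw [← hpq]
        exact this
      · intro h
        rw [← PySem.List.map_snd_enumerate τ 0] at h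
        obtain ⟨p, hp, hpj⟩ := List.mem_map.mp h
        have : p ∈ (PySem.List.enumerate τ).filter (fun p => p.2 == (j : Int)) := by
          rw [List.mem_filter]
          exact ⟨hp, by simp [hpj]⟩
        intro hlen0
        rw [List.length_eq_zero_iff, List.map_eq_nil_iff] at hlen0
        rw [hlen0] at this
        cases this
    rw [hpt]
    have hkeys : (finalD (L.zip τ) PySem.Dict.empty).keys = PySem.Set.ofList τ := by
      rw [finalD, PySem.Dict.keys_foldl_insert_key ((L.zip τ)) (fun p => p.2)
        (fun d p => p.1.2) PySem.Dict.empty]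
      rw [show (PySem.Dict.empty : PySem.Dict Int Int).keys = [] from rfl,
        PySem.Set.update_nil_left]
      congr 1
      exact List.map_snd_zip (le_of_eq hlen)
    have hsize : (finalD (L.zip τ) PySem.Dict.empty).size =
        (PySem.Set.ofList τ).length := by
      rw [← hkeys]
      simp [PySem.Dict.size, PySem.Dict.keys]
    rw [hsize]
    have hcnt : (List.range L.length).countP (fun j : Nat => decide ((j : Int) ∈ τ)) =
        (PySem.Set.ofList τ).length := by
      have hperm : (((List.range L.length).filter (fun j : Nat => decide ((j : Int) ∈ τ))).map
          (fun j : Nat => (j : Int))).Perm (PySem.Set.ofList τ) := by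
        rw [List.perm_ext_iff_of_nodup ?_ (PySem.Set.nodup_ofList τ)]
        · intro x
          simp only [List.mem_map, List.mem_filter, List.mem_range, PySem.Set.mem_ofList,
            decide_eq_true_eq]
          constructor
          · rintro ⟨j, ⟨_, hj⟩, rfl⟩; exact hj
          · intro hx
            obtain ⟨h0, h1⟩ := hmem x hx
            exact ⟨x.toNat, ⟨by omega, by rw [show ((x.toNat : Nat) : Int) = x by omega]; exact hx⟩,
              by omega⟩
        · apply List.Nodup.map
          · intro a b hab
            exact Nat.cast_injective (by simpa using hab)
          · exact List.Nodup.filter _ List.nodup_range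
      have := hperm.length_eq
      rw [List.length_map, ← List.countP_eq_length_filter] at this
      rw [this]
    rw [← hcnt]
    simp
  by_cases hall : ∀ r : Int, chain ((PySem.Dict.empty : PySem.Dict Int Int).getD r (-1))
      (grp (L.zip τ) r) = true
  · rw [if_pos (hsol.mpr hall), sim_some (L.zip τ) PySem.Dict.empty hall, hmval]
  · rw [if_neg (fun h => hall (hsol.mp h)), sim_none (L.zip τ) PySem.Dict.empty hall]

-- ---- final assembly ----

lemma fold_min_match (W : List (Option Int)) : ∀ (a : Int),
    W.foldl (fun o w => match w with | some v => if v < o then v else o | none => o) a =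
      match ominList W with | none => a | some v => min a v := by
  induction W with
  | nil => intro a; rfl
  | cons w t ih =>
      intro a
      rw [List.foldl_cons, ih]
      rw [show ominList (w :: t) = List.foldl omin (omin none w) t from rfl,
        foldl_omin_from t (omin none w)]
      cases w with
      | none => cases ominList t <;> rfl
      | some u =>
          have hstep : (match some u with
              | some v => if v < a then v else a
              | none => a) = min a u := by
            show (if u < a then u else a) = min a u
            rw [min_def]; split_ifs <;> omega
          rw [hstep]
          cases ht : ominList t with
          | none => rfl
          | some v =>
              show min (min a u) v = min a (min u v)
              rw [min_assoc]

-- ===== VERDICT (by name: the statement is the Claim_ definition above) =====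
theorem min_intpart_exhaustive_spec : Claim_equal_min_intpart_exhaustive := by
  intro L _
  show min_intpart_exhaustive L = min_intpart_exhaustive_alt L
  have hA1 : min_intpart_exhaustive L =
      ((prodA ((List.range L.length).map
          (fun i : Nat => PySem.List.pyRange 0 ((i : Int) + 1) 1))).foldl
        (fun (st : List (List (List Int)) × Int) order =>
          let candidate := candOf L.length order
          let C := st.1 ++ [candidate]
          let opt := C.foldl
            (fun o y => if solA L y then (let v := mvalA y; if v < o then v else o) else o) st.2
          (C, opt)) ([], (L.length : Int))).2 := rfl
  rw [hA1, loopA_inv L _ [] (L.length : Int) (by rfl)]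
  simp only [List.nil_append]
  rw [List.foldl_map]
  have hstep : ∀ (o : Int) (τ : List Int),
      τ ∈ prodA ((List.range L.length).map
        (fun i : Nat => PySem.List.pyRange 0 ((i : Int) + 1) 1)) →
      stepA L o (candOf L.length τ) =
        (match sim (L.zip τ) PySem.Dict.empty with
          | some v => if v < o then v else o
          | none => o) := by
    intro o τ hτ
    obtain ⟨hlen0, hidx⟩ := mem_prodA _ τ hτ
    have hlen : τ.length = L.length := by simpa using hlen0
    have hlab : ∀ p ∈ PySem.List.enumerate τ, 0 ≤ p.2 ∧ p.2 < (L.length : Int) := by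
      intro p hp
      rw [PySem.List.mem_enumerate_iff] at hp
      obtain ⟨k, hk, rfl⟩ := hp
      have hk' : k < ((List.range L.length).map
          (fun i : Nat => PySem.List.pyRange 0 ((i : Int) + 1) 1)).length := by
        simp only [List.length_map, List.length_range]
        omega
      have hmemk := hidx k hk hk'
      rw [List.getElem_map, List.getElem_range] at hmemk
      rw [PySem.List.mem_pyRange_one] at hmemk
      have hkm : k < L.length := by omega
      constructor
      · exact hmemk.1
      · have : ((k : Int)) + 1 ≤ (L.length : Int) := by exact_mod_cast hkm
        omega
    rw [stepA, ← valA_eq_sim L τ hlen hlab]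
    by_cases hs : solA L (candOf L.length τ) = true
    · simp [hs]
    · simp [hs]
  have hcong := PySem.List.foldl_congr_mem _ _
    (fun (o : Int) τ => (match sim (L.zip τ) PySem.Dict.empty with
      | some v => if v < o then v else o
      | none => o)) (L.length : Int) hstep
  rw [hcong]
  rw [show (prodA ((List.range L.length).map
        (fun i : Nat => PySem.List.pyRange 0 ((i : Int) + 1) 1))).foldl
      (fun o τ => (match sim (L.zip τ) PySem.Dict.empty with
        | some v => if v < o then v else o
        | none => o)) (L.length : Int) =
      ((prodA ((List.range L.length).map
        (fun i : Nat => PySem.List.pyRange 0 ((i : Int) + 1) 1))).map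
          (fun τ => sim (L.zip τ) PySem.Dict.empty)).foldl
        (fun o w => (match w with
          | some v => if v < o then v else o
          | none => o)) (L.length : Int) from (List.foldl_map (f := fun τ : List Int => sim (L.zip τ) PySem.Dict.empty)
        (g := fun (o : Int) (w : Option Int) => (match w with
          | some v => if v < o then v else o
          | none => o))).symm]
  rw [fold_min_match]
  have hB : min_intpart_exhaustive_alt L =
      (match goB L 0 PySem.Dict.empty with
        | none => (L.length : Int)
        | some v => v) := rfl
  rw [hB, goB_eq L 0 PySem.Dict.empty]
  have hranges : rangesFrom 0 L.length = (List.range L.length).map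
      (fun i : Nat => PySem.List.pyRange 0 ((i : Int) + 1) 1) := by
    rw [rangesFrom_eq L.length 0]
    apply List.map_congr_left
    intro k _
    norm_num
  rw [hranges]
  cases hW : ominList ((prodA ((List.range L.length).map
      (fun i : Nat => PySem.List.pyRange 0 ((i : Int) + 1) 1))).map
        (fun τ => sim (L.zip τ) PySem.Dict.empty)) with
  | none => rfl
  | some v =>
      show min (L.length : Int) v = v
      have hmemW := ominList_mem _ v hW
      obtain ⟨τ, hτ, hsim⟩ := List.mem_map.mp hmemW
      have hle := sim_le (L.zip τ) PySem.Dict.empty v hsim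
      have hzl : ((L.zip τ).length : Int) ≤ (L.length : Int) := by
        rw [List.length_zip]
        exact_mod_cast Nat.min_le_left _ _
      have hsz : ((PySem.Dict.empty : PySem.Dict Int Int).size : Int) = 0 := rfl
      rw [hsz] at hle
      exact min_eq_right (by omega)
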